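-- pv_equiv track=rewrite | github.com/Peterh226/legit-kits-cut-guide | lint.py | check_ambiguous_codes
-- ===== SOURCE A (Python) =====
-- def check_ambiguous_codes(data):
--     """Warn on fabric codes likely to be misread."""
--     warnings = []
--     codes = sorted({row[0] for row in data})
--
--     single_letter = [c for c in codes if len(c) == 1]
--     if single_letter:
--         warnings.append(
--             f"  Single-letter codes (easy to misread — verify against scan): {', '.join(single_letter)}"
--         )
--
--     for c in codes:
--         longer = [other for other in codes if other != c and other.startswith(c)]
--         if longer:
--             warnings.append(
--                 f"  Code '{c}' is a prefix of {longer} — double-check both against scan"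
--             )
--
--     return warnings
-- ===== SOURCE B (Python) =====
-- def check_ambiguous_codes(data):
--     """Warn on fabric codes likely to be misread (prefix-index variant)."""
--     codes = sorted({row[0] for row in data})
--
--     # Index every proper prefix of every code once, instead of an all-pairs scan.
--     pairs = [(o[:k], o) for o in codes for k in range(len(o))]
--     ext = {}
--     for p, o in pairs:
--         ext[p] = ext.get(p, []) + [o]
--
--     singles = [c for c in codes if len(c) == 1]
--     head = (
--         [f"  Single-letter codes (easy to misread — verify against scan): {', '.join(singles)}"]
--         if singles else []
--     )
--     return head + [
--         f"  Code '{c}' is a prefix of {ext.get(c, [])} — double-check both against scan"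
--         for c in codes
--         if ext.get(c, [])
--     ]
-- ===== Notes on version B (the rewrite author's own statement) =====
-- stated objective: alternative
-- what changed: Instead of scanning all codes with startswith for every code (all-pairs accumulator loop), B builds a dictionary once mapping every proper prefix of every code to the list of codes extending it, and emits the warnings as a head list plus a comprehension of dictionary lookups.
import Mathlib
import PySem

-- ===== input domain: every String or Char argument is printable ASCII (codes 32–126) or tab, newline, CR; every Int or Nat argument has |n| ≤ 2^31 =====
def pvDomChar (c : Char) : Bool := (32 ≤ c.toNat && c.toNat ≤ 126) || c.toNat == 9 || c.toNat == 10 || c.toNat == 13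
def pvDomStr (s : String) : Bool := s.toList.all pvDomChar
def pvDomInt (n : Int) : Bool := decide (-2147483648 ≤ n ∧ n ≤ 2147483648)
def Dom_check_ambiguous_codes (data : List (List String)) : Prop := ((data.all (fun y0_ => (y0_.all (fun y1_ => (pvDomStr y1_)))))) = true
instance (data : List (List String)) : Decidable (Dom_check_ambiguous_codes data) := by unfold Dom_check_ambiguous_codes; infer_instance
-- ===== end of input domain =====

-- B indexes every proper prefix of every code in a dictionary built once and emits the
-- warnings by lookup/comprehension, instead of A's all-pairs startswith scan (alternative algorithm).

-- Shared formatting helpers: hand ports of the Python f-strings both programs use.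
-- pvReprStr is Python's repr() of a str, exact on Dom's characters (printable ASCII, tab, newline, CR).
def pvReprChar (q : Char) (ch : Char) : List Char :=
  if ch = '\\' then ['\\', '\\']
  else if ch = '\t' then ['\\', 't']
  else if ch = '\n' then ['\\', 'n']
  else if ch = '\r' then ['\\', 'r']
  else if ch = q then ['\\', q]
  else [ch]

def pvReprStr (s : String) : String :=
  let cs := s.toList
  let q : Char := if cs.contains '\'' && !(cs.contains '"') then '"' else '\''
  String.ofList (q :: cs.flatMap (pvReprChar q) ++ [q])

-- Python's str() of a list of str (as in f"{longer}")
def pvReprStrList (xs : List String) : String :=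
  PySem.Str.join "" ["[", PySem.Str.join ", " (xs.map pvReprStr), "]"]

def pvMsgSingle (single_letter : List String) : String :=
  PySem.Str.join "" ["  Single-letter codes (easy to misread — verify against scan): ",
                     PySem.Str.join ", " single_letter]

def pvMsgPrefix (c : String) (longer : List String) : String :=
  PySem.Str.join "" ["  Code '", c, "' is a prefix of ", pvReprStrList longer,
                     " — double-check both against scan"]

-- ===== PORT A =====
def check_ambiguous_codes (data : List (List String)) : List String :=
  let codes := PySem.List.sorted
    (PySem.Set.ofList (data.map (fun row => PySem.List.pyGetD row 0 ""))) (fun x => x) false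
  let single_letter := codes.filter (fun c => PySem.Str.len c == 1)
  let warnings : List String :=
    if single_letter.isEmpty then [] else [pvMsgSingle single_letter]
  codes.foldl (fun acc c =>
    let longer := codes.filter (fun o => !(o == c) && PySem.Str.startswith o c)
    if longer.isEmpty then acc else acc ++ [pvMsgPrefix c longer]) warnings

-- ===== PORT B =====
-- pairs = [(o[:k], o) for o in codes for k in range(len(o))]
def pvPrefixPairs (codes : List String) : List (String × String) :=
  codes.flatMap (fun o =>
    (PySem.List.pyRange 0 (PySem.Str.len o) 1).map
      (fun k => (PySem.Str.slice o none (some k), o)))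

-- for p, o in pairs: ext[p] = ext.get(p, []) + [o]
def pvBuildExt (codes : List String) : PySem.Dict String (List String) :=
  (pvPrefixPairs codes).foldl (fun d p => d.modify p.1 [] (· ++ [p.2])) PySem.Dict.empty

def check_ambiguous_codes_alt (data : List (List String)) : List String :=
  let codes := PySem.List.sorted
    (PySem.Set.ofList (data.map (fun row => PySem.List.pyGetD row 0 ""))) (fun x => x) false
  let ext := pvBuildExt codes
  let singles := codes.filter (fun c => PySem.Str.len c == 1)
  let head : List String := if singles.isEmpty then [] else [pvMsgSingle singles]
  head ++ (codes.filter (fun c => !(ext.getD c []).isEmpty)).map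
    (fun c => pvMsgPrefix c (ext.getD c []))

-- ===== PRECONDITION & SPEC =====
-- A evaluates row[0]; on any empty row Python raises IndexError, so those inputs are excluded.
def Pre_check_ambiguous_codes (data : List (List String)) : Prop := ∀ row ∈ data, row ≠ []
instance (data : List (List String)) : Decidable (Pre_check_ambiguous_codes data) := by
  unfold Pre_check_ambiguous_codes; infer_instance

def pvWitness_check_ambiguous_codes : List (List String) := [["AB"], ["A"], ["ABC"], ["x", "y"]]

def Spec_check_ambiguous_codes (data : List (List String)) (out : List String) : Prop := out = check_ambiguous_codes_alt data
instance (data : List (List String)) (out : List String) : Decidable (Spec_check_ambiguous_codes data out) := by unfold Spec_check_ambiguous_codes; infer_instance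

-- ===== CLAIM (what is proved, stated in full; the proofs are below) =====
def Claim_equal_check_ambiguous_codes : Prop := ∀ (data : List (List String)), Dom_check_ambiguous_codes data → Pre_check_ambiguous_codes data → Spec_check_ambiguous_codes data (check_ambiguous_codes data)

-- ===== LEMMAS AND PROOFS =====

lemma pvBeqToList (s t : String) : (s == t) = (s.toList == t.toList) := by
  rcases s with ⟨ls⟩; rcases t with ⟨lt⟩; simp [String.ext_iff]

lemma pvRangeCast (n : Int) :
    PySem.List.pyRange 0 n 1 = (List.range n.toNat).map (fun (k : Nat) => (k : Int)) := by
  rw [PySem.List.pyRange_one, sub_zero]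
  exact List.map_congr_left (fun k _ => by omega)

lemma pvSliceBeq (o c : String) (k : Nat) :
    (PySem.Str.slice o none (some (k : Int)) == c) = (o.toList.take k == c.toList) := by
  have h : (PySem.Str.slice o none (some (k : Int))).toList = o.toList.take k := by simp [pysem]
  rw [pvBeqToList, h]

lemma pvFilterBeqRange (L n : Nat) (h : n < L) :
    (List.range L).filter (fun k => k == n) = [n] := by
  induction L with
  | zero => omega
  | succ L ih =>
    rw [List.range_succ, List.filter_append]
    by_cases hn : n = L
    · subst hn
      have he : (List.range n).filter (fun k => k == n) = [] := by
        apply List.filter_eq_nil_iff.mpr; intro a ha; simp at ha ⊢; omega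
      simp [he]
    · have hLn : ((L : Nat) == n) = false := by simp; omega
      simp [ih (by omega), hLn]

lemma pvCondIff (o c : String) :
    ((!(o == c) && PySem.Str.startswith o c) = true)
      ↔ (c.toList <+: o.toList ∧ c.toList.length < o.toList.length) := by
  rw [Bool.and_eq_true, Bool.not_eq_true', pvBeqToList]
  constructor
  · rintro ⟨hne, hsw⟩
    have hp : c.toList <+: o.toList := by
      have := PySem.Str.startswith_eq o c ▸ hsw
      exact (PySem.Chars.startswith_iff _ _).mp this
    refine ⟨hp, ?_⟩
    have hle := hp.length_le
    rcases lt_or_eq_of_le hle with h | h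
    · exact h
    · exact absurd (hp.eq_of_length h).symm (by simpa using hne)
  · rintro ⟨hp, hl⟩
    refine ⟨by simp; intro he; rw [he] at hl; omega, ?_⟩
    rw [PySem.Str.startswith_eq]
    exact (PySem.Chars.startswith_iff _ _).mpr hp

lemma pvFilterTake (o c : String) :
    (List.range o.toList.length).filter (fun k => o.toList.take k == c.toList)
      = if (!(o == c) && PySem.Str.startswith o c) then [c.toList.length] else [] := by
  by_cases hcond : (!(o == c) && PySem.Str.startswith o c) = true
  · obtain ⟨hp, hl⟩ := (pvCondIff o c).mp hcond
    have heq : ∀ k ∈ List.range o.toList.length,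
        (o.toList.take k == c.toList) = (k == c.toList.length) := by
      intro k hk
      simp only [List.mem_range] at hk
      rw [Bool.eq_iff_iff]
      simp only [beq_iff_eq]
      constructor
      · intro ht
        have hlk : (o.toList.take k).length = k := by rw [List.length_take]; omega
        rw [ht] at hlk; omega
      · intro hk2; subst hk2
        exact (List.prefix_iff_eq_take.mp hp).symm
    rw [List.filter_congr heq, pvFilterBeqRange _ _ hl, hcond]
    simp
  · rw [if_neg hcond]
    apply List.filter_eq_nil_iff.mpr
    intro k hk
    simp only [List.mem_range] at hk
    simp only [beq_iff_eq]
    intro ht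
    apply hcond
    apply (pvCondIff o c).mpr
    have hlen : c.toList.length = k := by
      rw [← ht, List.length_take]; omega
    exact ⟨ht ▸ List.take_prefix k o.toList, by omega⟩

lemma pvPairsFilter (o c : String) :
    ((((PySem.List.pyRange 0 (PySem.Str.len o) 1).map
        (fun k => (PySem.Str.slice o none (some k), o))).filter
          (fun p => p.1 == c)).map (·.2))
      = if (!(o == c) && PySem.Str.startswith o c) then [o] else [] := by
  rw [PySem.Str.len_eq, pvRangeCast, List.map_map, List.filter_map, List.map_map]
  have hnat : ((o.toList.length : Int)).toNat = o.toList.length := by omega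
  rw [hnat]
  have hpred : ∀ k ∈ List.range o.toList.length,
      (((fun p => p.1 == c) ∘ (fun k => (PySem.Str.slice o none (some k), o)) ∘ (fun (k : Nat) => (k : Int))) k)
        = (o.toList.take k == c.toList) := by
    intro k _; simp only [Function.comp]; exact pvSliceBeq o c k
  rw [List.filter_congr hpred, pvFilterTake]
  split <;> simp

lemma pvFlatMapIte (p : String → Bool) (l : List String) :
    (l.flatMap fun o => if p o then [o] else []) = l.filter p := by
  induction l with
  | nil => rfl
  | cons a t ih =>
    rw [List.flatMap_cons, ih]
    by_cases h : p a <;> simp [h]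

lemma pvExtGetD (codes : List String) (c : String) :
    (pvBuildExt codes).getD c []
      = codes.filter (fun o => !(o == c) && PySem.Str.startswith o c) := by
  unfold pvBuildExt pvPrefixPairs
  rw [PySem.Dict.getD_foldl_modify_append]
  rw [List.filter_flatMap, List.map_flatMap]
  have : ∀ o : String,
      ((((PySem.List.pyRange 0 (PySem.Str.len o) 1).map
          (fun k => (PySem.Str.slice o none (some k), o))).filter
            (fun p => p.1 == c)).map (·.2))
        = if (!(o == c) && PySem.Str.startswith o c) then [o] else [] := pvPairsFilter (c := c)
  simp only [this, pvFlatMapIte]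
  simp [pysem]

lemma pvLoopEq (codes head : List String) :
    codes.foldl (fun acc c =>
      let longer := codes.filter (fun o => !(o == c) && PySem.Str.startswith o c)
      if longer.isEmpty then acc else acc ++ [pvMsgPrefix c longer]) head
    = head ++ (codes.filter (fun c => !((pvBuildExt codes).getD c []).isEmpty)).map
        (fun c => pvMsgPrefix c ((pvBuildExt codes).getD c [])) := by
  have h1 : (fun (acc : List String) (c : String) =>
      let longer := codes.filter (fun o => !(o == c) && PySem.Str.startswith o c)
      if longer.isEmpty then acc else acc ++ [pvMsgPrefix c longer])
    = (fun (acc : List String) (c : String) =>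
        if !((pvBuildExt codes).getD c []).isEmpty
        then acc ++ [pvMsgPrefix c ((pvBuildExt codes).getD c [])] else acc) := by
    funext acc c
    simp only [pvExtGetD]
    cases (codes.filter (fun o => !(o == c) && PySem.Str.startswith o c)).isEmpty <;> simp
  rw [h1, PySem.List.foldl_append_if]

-- ===== VERDICT (by name: the statement is the Claim_ definition above) =====
theorem check_ambiguous_codes_spec : Claim_equal_check_ambiguous_codes := by
  intro data _hdom _hpre
  unfold Spec_check_ambiguous_codes
  simp only [check_ambiguous_codes, check_ambiguous_codes_alt]
  rw [pvLoopEq]
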